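-- pv_equiv track=rewrite | github.com/dhawal-mehta/DSA | Dynamic Programmming/DP 3/Odd Palindrome.py | solve
-- ===== SOURCE A (Python) =====
-- def solve(A):
--
--     n = len(A)
--
--     Mod = 1000000007
--
--     # Created dp of size n+2 * n+2 so that, we don't have to check boundary conditions.
--     dp=[[0 for i in range(n+2)] for i in range(n+2)]
--
--     for l in range(n+1, -1, -1):
--         for i in range(0, n+2-l):
--             j = i+l
--
--             # base condtition, Number of ways to choose palindromic subsequence without any character on left or right is 1.
--             if(i==0 or j == n+1):
--                 dp[i][j] = 1
--             else:
--                 dp[i][j] = dp[i-1][j] + dp[i][j+1]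
--
--                 # subtract dp[i-1][j+1], As dp[i-1][j] contains dp[i-1][j+1] and dp[i][j+1] contains dp[i-1][j+1]
--                 if(A[i-1] != A[j-1]):
--                     dp[i][j] -= dp[i-1][j+1]
--
--             dp[i][j] = (dp[i][j] + Mod) % Mod
--
--     ans = []
--
--     for i in range(1, n+1):
--         if(i==1 or i==n):
--             ans.append(1)
--         else:
--             ans.append(dp[i-1][i+1])
--
--     return ans;
-- ===== SOURCE B (Python) =====
-- def solve(A):
--     n = len(A)
--     Mod = 1000000007
--     ans = []
--     for c in range(1, n + 1):
--         if c == 1 or c == n: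
--             ans.append(1)
--             continue
--         lb = n - c
--         prev = [1] * (lb + 1)
--         for a in range(1, c):
--             row = [1]
--             for b in range(1, lb + 1):
--                 v = prev[b] + row[b - 1]
--                 if A[a - 1] != A[n - b]:
--                     v -= prev[b - 1]
--                 row.append(v % Mod)
--             prev = row
--         ans.append(prev[lb])
--     return ans
-- ===== Notes on version B (the rewrite author's own statement) =====
-- stated objective: alternative
-- what changed: A fills one shared (n+2)x(n+2) table by anti-diagonals with sentinel border rows and reads all answers off it; B instead computes each center's answer independently as a per-center common-subsequence-count DP over the prefix/suffix around that center, kept as a rolling 1-D row that is rebuilt from scratch for every center.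
import Mathlib
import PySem

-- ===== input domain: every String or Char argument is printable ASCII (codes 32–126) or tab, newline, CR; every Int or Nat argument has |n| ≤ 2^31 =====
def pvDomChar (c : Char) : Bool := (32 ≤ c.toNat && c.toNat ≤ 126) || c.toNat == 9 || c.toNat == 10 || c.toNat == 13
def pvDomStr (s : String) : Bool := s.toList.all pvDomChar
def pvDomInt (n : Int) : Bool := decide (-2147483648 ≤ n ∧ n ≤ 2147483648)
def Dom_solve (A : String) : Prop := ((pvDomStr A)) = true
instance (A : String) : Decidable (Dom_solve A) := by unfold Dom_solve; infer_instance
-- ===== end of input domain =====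

-- B replaces A's single shared (n+2)×(n+2) anti-diagonal table with an independent per-center
-- common-subsequence count DP kept as a rolling 1-D row; objective: alternative decomposition (B is O(n^3) vs A's O(n^2)).

-- ===== PORT A =====
-- dp[i][j] read (indices are in range whenever the Python reads them)
def pvGet2 (dp : List (List Int)) (i j : Int) : Int := (dp.getD i.toNat []).getD j.toNat 0
-- dp[i][j] = v
def pvSet2 (dp : List (List Int)) (i j : Int) (v : Int) : List (List Int) :=
  dp.modify i.toNat (fun row => row.set j.toNat v)

-- body of the inner 'for i' loop of A
def aInner (s : List Char) (l : Int) (dp : List (List Int)) (i : Int) : List (List Int) :=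
  let n : Int := s.length
  let j := i + l
  let v : Int :=
    if i = 0 ∨ j = n + 1 then 1
    else
      let v := pvGet2 dp (i-1) j + pvGet2 dp i (j+1)
      if s.getD (i-1).toNat ' ' ≠ s.getD (j-1).toNat ' ' then v - pvGet2 dp (i-1) (j+1) else v
  pvSet2 dp i j ((v + 1000000007) % 1000000007)

-- body of the outer 'for l' loop of A
def aOuter (s : List Char) (dp : List (List Int)) (l : Int) : List (List Int) :=
  (PySem.List.pyRange 0 ((s.length : Int) + 2 - l) 1).foldl (aInner s l) dp

def solve (A : String) : List Int :=
  let s := A.toList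
  let n : Int := s.length
  let dp := (PySem.List.pyRange (n+1) (-1) (-1)).foldl (aOuter s)
    (List.replicate (s.length+2) (List.replicate (s.length+2) (0:Int)))
  (PySem.List.pyRange 1 (n+1) 1).foldl
    (fun ans i => ans ++ [if i = 1 ∨ i = n then (1:Int) else pvGet2 dp (i-1) (i+1)]) []

-- ===== PORT B =====
-- inner 'for b' loop of B: extend the current row by one column
def bRow (s : List Char) (prev : List Int) (a : Int) (row : List Int) (b : Int) : List Int :=
  let v := prev.getD b.toNat 0 + row.getD (b.toNat - 1) 0
  let v := if s.getD (a.toNat - 1) ' ' ≠ s.getD (s.length - b.toNat) ' '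
           then v - prev.getD (b.toNat - 1) 0 else v
  row ++ [v % 1000000007]

-- one row step of B: build the next row from the previous one
def bStep (s : List Char) (lb : Nat) (prev : List Int) (a : Int) : List Int :=
  (PySem.List.pyRange 1 ((lb : Int) + 1) 1).foldl (bRow s prev a) [1]

-- B's per-center count: rolling-row DP over the prefix/suffix around center c
def bCenter (s : List Char) (c : Int) : Int :=
  let lb : Nat := s.length - c.toNat
  let prev := (PySem.List.pyRange 1 c 1).foldl (bStep s lb) (List.replicate (lb+1) (1:Int))
  prev.getD lb 0

def solve_alt (A : String) : List Int :=
  let s := A.toList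
  let n : Int := s.length
  (PySem.List.pyRange 1 (n+1) 1).foldl
    (fun ans c => ans ++ [if c = 1 ∨ c = n then (1:Int) else bCenter s c]) []

-- ===== PRECONDITION & SPEC =====
def Spec_solve (A : String) (out : List Int) : Prop := out = solve_alt A
instance (A : String) (out : List Int) : Decidable (Spec_solve A out) := by unfold Spec_solve; infer_instance

-- ===== CLAIM (what is proved, stated in full; the proofs are below) =====
def Claim_equal_solve : Prop := ∀ (A : String), Dom_solve A → Spec_solve A (solve A)

-- ===== LEMMAS AND PROOFS =====

-- ghost value: gh s a b = the common count both programs compute for "a characters on the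
-- left of the center, b characters on the right", modulo 1e9+7
def gh (s : List Char) : Nat → Nat → Int
  | 0, _ => 1
  | _+1, 0 => 1
  | a+1, b+1 =>
    (gh s a (b+1) + gh s (a+1) b -
      (if s.getD a ' ' ≠ s.getD (s.length - (b+1)) ' ' then gh s a b else 0)) % 1000000007
termination_by a b => (a, b)

theorem gh_zero_left (s : List Char) (b : Nat) : gh s 0 b = 1 := by cases b <;> simp [gh]
theorem gh_zero_right (s : List Char) (a : Nat) : gh s a 0 = 1 := by cases a <;> simp [gh]
theorem gh_succ (s : List Char) (a b : Nat) :
    gh s (a+1) (b+1) =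
    (gh s a (b+1) + gh s (a+1) b -
      (if s.getD a ' ' ≠ s.getD (s.length - (b+1)) ' ' then gh s a b else 0)) % 1000000007 := by
  rw [gh]

-- table dimensions
def dimsOK (n : Nat) (dp : List (List Int)) : Prop :=
  dp.length = n + 2 ∧ ∀ i : Nat, i < n + 2 → (dp.getD i []).length = n + 2

theorem dims_set2 {n : Nat} {dp : List (List Int)} (h : dimsOK n dp) (i j : Nat) (v : Int) :
    dimsOK n (pvSet2 dp (i : Int) (j : Int) v) := by
  obtain ⟨hlen, hrow⟩ := h
  refine ⟨by simpa [pvSet2] using hlen, ?_⟩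
  intro i' hi'
  have hi2 : i' < dp.length := by omega
  have := hrow i' hi'
  simp only [pvSet2, List.getD_eq_getElem?_getD, List.getElem?_modify,
    List.getElem?_eq_getElem hi2] at *
  split <;> simpa using this

theorem get2_set2_self {n : Nat} {dp : List (List Int)} (h : dimsOK n dp)
    {i j : Nat} (hi : i < n + 2) (hj : j < n + 2) (v : Int) :
    pvGet2 (pvSet2 dp (i : Int) (j : Int) v) (i : Int) (j : Int) = v := by
  obtain ⟨hlen, hrow⟩ := h
  have hi2 : i < dp.length := by omega
  have hr := hrow i hi
  simp only [List.getD_eq_getElem?_getD, List.getElem?_eq_getElem hi2, Option.getD_some] at hr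
  have hjl : j < dp[i].length := by omega
  simp [pvGet2, pvSet2, List.getD_eq_getElem?_getD,
    List.getElem?_eq_getElem hi2, hjl]

theorem get2_set2_ne {dp : List (List Int)} {i j i' j' : Nat} (hne : i' ≠ i ∨ j' ≠ j) (v : Int) :
    pvGet2 (pvSet2 dp (i : Int) (j : Int) v) (i' : Int) (j' : Int) = pvGet2 dp (i' : Int) (j' : Int) := by
  simp only [pvGet2, pvSet2, List.getD_eq_getElem?_getD, List.getElem?_modify, Int.toNat_natCast]
  rcases hne with hne | hne
  · rcases h : dp[i']? with _ | row
    · simp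
    · simp [Ne.symm hne]
  · rcases h : dp[i']? with _ | row
    · simp
    · by_cases hii : i = i'
      · simp [hii, Ne.symm hne]
      · simp [hii]

-- A-side invariants
def InvO (s : List Char) (L : Nat) (dp : List (List Int)) : Prop :=
  dimsOK s.length dp ∧ ∀ i j : Nat, j ≤ s.length + 1 → L + i ≤ j →
    pvGet2 dp (i : Int) (j : Int) = gh s i (s.length + 1 - j)

def InvI (s : List Char) (L m : Nat) (dp : List (List Int)) : Prop :=
  dimsOK s.length dp ∧ ∀ i j : Nat, j ≤ s.length + 1 →
    (L + 1 + i ≤ j ∨ (j = i + L ∧ i < m)) →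
    pvGet2 dp (i : Int) (j : Int) = gh s i (s.length + 1 - j)

theorem inner_step (s : List Char) (L m : Nat) (dp : List (List Int))
    (hm : m + L ≤ s.length + 1) (h : InvI s L m dp) :
    InvI s L (m+1) (aInner s (L : Int) dp (m : Int)) := by
  obtain ⟨hd, hv⟩ := h
  have hstep : aInner s (L : Int) dp (m : Int)
      = pvSet2 dp (m : Int) ((m + L : Nat) : Int) (gh s m (s.length + 1 - (m + L))) := by
    simp only [aInner]
    have ej : ((m : Int) + (L : Int)) = ((m + L : Nat) : Int) := by push_cast; ring
    rw [ej]
    by_cases h0 : m = 0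
    · subst h0
      have hc : ((0 : Nat) : Int) = 0 ∨ ((0 + L : Nat) : Int) = (s.length : Int) + 1 := by
        left; simp
      rw [if_pos hc, gh_zero_left]
      norm_num
    · by_cases h1 : m + L = s.length + 1
      · have hc : ((m : Nat) : Int) = 0 ∨ ((m + L : Nat) : Int) = (s.length : Int) + 1 := by
          right; omega
        rw [if_pos hc]
        have : s.length + 1 - (m + L) = 0 := by omega
        rw [this, gh_zero_right]
        norm_num
      · have hc : ¬(((m : Nat) : Int) = 0 ∨ ((m + L : Nat) : Int) = (s.length : Int) + 1) := by
          refine not_or.mpr ?_; constructor <;> omega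
        rw [if_neg hc]
        have e1 : ((m : Int) - 1) = ((m - 1 : Nat) : Int) := by omega
        have e2 : (((m + L : Nat) : Int) + 1) = ((m + L + 1 : Nat) : Int) := by push_cast; ring
        rw [e1, e2]
        have r1 := hv (m-1) (m+L) (by omega) (by left; omega)
        have r2 := hv m (m+L+1) (by omega) (by left; omega)
        have r3 := hv (m-1) (m+L+1) (by omega) (by left; omega)
        rw [r1, r2, r3]
        have et1 : ((m - 1 : Nat) : Int).toNat = m - 1 := by omega
        have et2 : (((m + L : Nat) : Int) - 1).toNat = m + L - 1 := by omega
        rw [et1, et2]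
        have hgh := gh_succ s (m-1) (s.length - (m+L))
        have ea : m - 1 + 1 = m := by omega
        have eb : s.length - (m+L) + 1 = s.length + 1 - (m+L) := by omega
        have ec : s.length - (s.length - (m+L) + 1) = m + L - 1 := by omega
        rw [ea, ec, eb] at hgh
        have ed : s.length + 1 - (m + L + 1) = s.length - (m + L) := by omega
        rw [hgh, ed]
        split
        · rw [Int.add_emod_right]
        · simp only [sub_zero]
          rw [Int.add_emod_right]
  rw [hstep]
  refine ⟨dims_set2 hd _ _ _, ?_⟩
  intro i j hj hcase
  by_cases heq : i = m ∧ j = m + L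
  · obtain ⟨hi1, hj1⟩ := heq
    subst hi1; subst hj1
    exact get2_set2_self hd (by omega) (by omega) _
  · have hne : i ≠ m ∨ j ≠ m + L := by tauto
    rw [get2_set2_ne hne]
    apply hv _ _ hj
    rcases hcase with hl | ⟨hr1, hr2⟩
    · left; exact hl
    · right; refine ⟨hr1, ?_⟩
      rcases hne with hne | hne <;> omega

theorem inner_all (s : List Char) (L : Nat) (dp : List (List Int))
    (hL : L ≤ s.length + 1) (h : InvO s (L+1) dp) :
    InvO s L (aOuter s dp (L : Int)) := by
  have h0 : InvI s L 0 dp := by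
    refine ⟨h.1, ?_⟩
    intro i j hj hc
    refine h.2 i j hj ?_
    rcases hc with hl | ⟨_, hi0⟩
    · omega
    · omega
  have hfold : ∀ mm, mm ≤ s.length + 2 - L →
      InvI s L mm ((List.range mm).foldl (fun acc (k : Nat) => aInner s (L : Int) acc (k : Int)) dp) := by
    intro mm
    induction mm with
    | zero => intro _; simpa using h0
    | succ mm ih =>
        intro hmm
        rw [List.range_succ, List.foldl_append, List.foldl_cons, List.foldl_nil]
        exact inner_step s L mm _ (by omega) (ih (by omega))
  unfold aOuter
  have e1 : ((s.length : Int) + 2 - (L : Int)) = ((s.length + 2 - L : Nat) : Int) := by omega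
  rw [e1, PySem.List.pyRange_one]
  have e2 : (((s.length + 2 - L : Nat) : Int) - 0).toNat = s.length + 2 - L := by omega
  rw [e2, List.foldl_map]
  simp only [zero_add]
  have hfin := hfold (s.length + 2 - L) (le_refl _)
  refine ⟨hfin.1, ?_⟩
  intro i j hj hij
  by_cases hd : j = i + L
  · exact hfin.2 i j hj (Or.inr ⟨hd, by omega⟩)
  · exact hfin.2 i j hj (Or.inl (by omega))

theorem outer_all (s : List Char) :
    InvO s 0 ((PySem.List.pyRange ((s.length : Int) + 1) (-1) (-1)).foldl (aOuter s)
      (List.replicate (s.length + 2) (List.replicate (s.length + 2) (0:Int)))) := by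
  have hdp0 : InvO s (s.length + 2) (List.replicate (s.length + 2) (List.replicate (s.length + 2) (0:Int))) := by
    refine ⟨⟨by simp, ?_⟩, ?_⟩
    · intro i hi
      simp [List.getD_eq_getElem?_getD, hi]
    · intro i j hj hij
      omega
  have hfold : ∀ k, k ≤ s.length + 2 → InvO s (s.length + 2 - k)
      ((List.range k).foldl (fun acc (k : Nat) => aOuter s acc ((s.length : Int) + 1 - (k : Int)))
        (List.replicate (s.length + 2) (List.replicate (s.length + 2) (0:Int)))) := by
    intro k
    induction k with
    | zero => intro _; simpa using hdp0
    | succ k ih =>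
        intro hk
        rw [List.range_succ, List.foldl_append, List.foldl_cons, List.foldl_nil]
        have e1 : ((s.length : Int) + 1 - (k : Int)) = ((s.length + 1 - k : Nat) : Int) := by omega
        rw [e1]
        have ihk := ih (by omega)
        have h2 := inner_all s (s.length + 1 - k)
          ((List.range k).foldl (fun acc (k : Nat) => aOuter s acc ((s.length : Int) + 1 - (k : Int)))
            (List.replicate (s.length + 2) (List.replicate (s.length + 2) (0:Int))))
          (by omega)
          (by rw [show (s.length + 1 - k) + 1 = s.length + 2 - k from by omega]; exact ihk)
        rw [show s.length + 2 - (k + 1) = s.length + 1 - k from by omega]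
        exact h2
  rw [PySem.List.pyRange_neg_one]
  have e4 : (((s.length : Int) + 1) - (-1)).toNat = s.length + 2 := by omega
  rw [e4, List.foldl_map]
  have := hfold (s.length + 2) (le_refl _)
  simpa using this

-- B-side lemmas
theorem bRow_inv (s : List Char) (lb a' m : Nat) (hm : m ≤ lb) :
    (PySem.List.pyRange 1 ((m : Int) + 1) 1).foldl
      (bRow s ((List.range (lb+1)).map (gh s a')) ((a' : Int) + 1)) [1]
    = (List.range (m+1)).map (gh s (a'+1)) := by
  induction m with
  | zero =>
      rw [show ((0 : Nat) : Int) + 1 = 1 from by norm_num]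
      rw [PySem.List.pyRange_one_eq_nil (le_refl 1)]
      simp [gh_zero_right]
  | succ m ih =>
      rw [show (((m+1 : Nat)) : Int) + 1 = ((m : Int) + 1) + 1 from by push_cast; ring]
      rw [PySem.List.pyRange_one_succ_right (by omega : (1:Int) ≤ (m : Int) + 1)]
      rw [List.foldl_append, ih (by omega), List.foldl_cons, List.foldl_nil]
      unfold bRow
      rw [show ((m : Int) + 1).toNat = m + 1 from by omega]
      rw [show ((a' : Int) + 1).toNat - 1 = a' from by omega]
      rw [show m + 1 - 1 = m from by omega]
      rw [PySem.List.getD_map_range _ _ _ _ (by omega : m + 1 < lb + 1)]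
      rw [PySem.List.getD_map_range _ _ _ _ (by omega : m < m + 1)]
      rw [PySem.List.getD_map_range _ _ _ _ (by omega : m < lb + 1)]
      dsimp only
      conv_rhs => rw [List.range_succ, List.map_append, List.map_cons, List.map_nil]
      congr 1
      simp only [List.cons.injEq, and_true]
      rw [gh_succ s a' m]
      split_ifs
      · rfl
      · simp

theorem bStep_inv (s : List Char) (lb a' : Nat) :
    bStep s lb ((List.range (lb+1)).map (gh s a')) ((a' : Int) + 1)
    = (List.range (lb+1)).map (gh s (a'+1)) := by
  unfold bStep
  exact bRow_inv s lb a' lb (le_refl lb)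

theorem bOuter_inv (s : List Char) (lb m : Nat) :
    (PySem.List.pyRange 1 ((m : Int) + 1) 1).foldl (bStep s lb)
      (List.replicate (lb+1) (1:Int))
    = (List.range (lb+1)).map (gh s m) := by
  induction m with
  | zero =>
      rw [show ((0 : Nat) : Int) + 1 = 1 from by norm_num]
      rw [PySem.List.pyRange_one_eq_nil (le_refl 1), List.foldl_nil]
      apply List.ext_getElem (by simp)
      intro k h1 h2
      simp [gh_zero_left]
  | succ m ih =>
      rw [show (((m+1 : Nat)) : Int) + 1 = ((m : Int) + 1) + 1 from by push_cast; ring]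
      rw [PySem.List.pyRange_one_succ_right (by omega : (1:Int) ≤ (m : Int) + 1)]
      rw [List.foldl_append, ih, List.foldl_cons, List.foldl_nil]
      exact bStep_inv s lb m

theorem bCenter_eq (s : List Char) (c : Nat) (hc : 1 ≤ c) (_hcn : c ≤ s.length) :
    bCenter s (c : Int) = gh s (c-1) (s.length - c) := by
  unfold bCenter
  dsimp only
  rw [show ((c : Int)).toNat = c from by omega]
  rw [show (c : Int) = ((c - 1 : Nat) : Int) + 1 from by omega]
  rw [bOuter_inv s (s.length - c) (c-1)]
  exact PySem.List.getD_map_range _ _ _ _ (by omega)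

-- fold-append congruence
theorem foldl_app_congr {α : Type} (L : List α) (f g : α → Int) (init : List Int)
    (h : ∀ x ∈ L, f x = g x) :
    L.foldl (fun ans x => ans ++ [f x]) init = L.foldl (fun ans x => ans ++ [g x]) init := by
  induction L generalizing init with
  | nil => rfl
  | cons y ys ih =>
      simp only [List.foldl_cons]
      rw [h y (List.mem_cons_self), ih _ (fun x hx => h x (List.mem_cons_of_mem _ hx))]

-- ===== VERDICT (by name: the statement is the Claim_ definition above) =====
theorem solve_spec : Claim_equal_solve := by
  intro A _
  unfold Spec_solve solve solve_alt
  dsimp only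
  apply foldl_app_congr
  intro x hx
  rw [PySem.List.mem_pyRange_one] at hx
  obtain ⟨hx1, hx2⟩ := hx
  by_cases hb : x = 1 ∨ x = (A.toList.length : Int)
  · rw [if_pos hb, if_pos hb]
  · rw [if_neg hb, if_neg hb]
    rcases not_or.mp hb with ⟨hn1, hnn⟩
    have hI := (outer_all A.toList).2
    have e1 : x - 1 = ((x.toNat - 1 : Nat) : Int) := by omega
    have e2 : x + 1 = ((x.toNat + 1 : Nat) : Int) := by omega
    rw [e1, e2, hI (x.toNat - 1) (x.toNat + 1) (by omega) (by omega)]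
    rw [show x = ((x.toNat : Nat) : Int) from by omega,
      bCenter_eq A.toList x.toNat (by omega) (by omega)]
    congr 1
    omega
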